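-- pv_equiv track=rewrite | github.com/dcerkoney/diagmc-potpourri | diaggen_tools.py | is_FI_simple
-- ===== SOURCE A (Python) =====
-- import itertools
--
-- def has_connection(graph, v_start, v_end, line_type):
--     return (v_start in graph) and (v_end in graph[v_start]) and (line_type in graph[v_start][v_end])
--
-- def is_FI_simple(graph, n_legs):
--     n_verts = len(graph)
--     # Check if this graph is the bare Fock self-energy term assumes the two
--     # external legs (if any) are ordered last in the vertex numbering scheme.
--     if (n_legs == 2) and all(has_connection(graph, n_verts - 2, n_verts - 1, line_type) for line_type in ['b', 'f']):
--         return False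
--     # Check the internal connections only; the only external-leg base case is handled above
--     for v1, v2 in itertools.combinations(range(len(graph) - n_legs), 2):
--         n_ferm_connections = has_connection(graph, v1, v2, 'f') + has_connection(graph, v2, v1, 'f')
--         n_bos_connections = has_connection(graph, v1, v2, 'b')
--         # Catches the Fock free-energy edge case where n_ferm_connections = 2
--         if (n_ferm_connections >= 1) and (n_bos_connections == 1):
--             return False
--     return True
-- ===== SOURCE B (Python) =====
-- def _types_between(graph, v, w):
--     return graph.get(v, {}).get(w, ())
--
-- def is_FI_simple(graph, n_legs):
--     n_verts = len(graph)
--     # bare Fock self-energy base case (external legs last in the numbering)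
--     ext = _types_between(graph, n_verts - 2, n_verts - 1)
--     if n_legs == 2 and 'b' in ext and 'f' in ext:
--         return False
--     # scan only the existing boson edges instead of all internal vertex pairs
--     n_int = n_verts - n_legs
--     for v, nbrs in graph.items():
--         if 0 <= v < n_int:
--             for w, ts in nbrs.items():
--                 if v < w < n_int and 'b' in ts:
--                     if 'f' in ts or 'f' in _types_between(graph, w, v):
--                         return False
--     return True
-- ===== Notes on version B (the rewrite author's own statement) =====
-- stated objective: faster
-- what changed: Instead of testing every internal vertex pair with dict lookups (O(V^2) pairs), B iterates once over the adjacency structure's existing boson edges and checks the fermion connection only for those, so sparse graphs cost O(E) lookups.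
import Mathlib
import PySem

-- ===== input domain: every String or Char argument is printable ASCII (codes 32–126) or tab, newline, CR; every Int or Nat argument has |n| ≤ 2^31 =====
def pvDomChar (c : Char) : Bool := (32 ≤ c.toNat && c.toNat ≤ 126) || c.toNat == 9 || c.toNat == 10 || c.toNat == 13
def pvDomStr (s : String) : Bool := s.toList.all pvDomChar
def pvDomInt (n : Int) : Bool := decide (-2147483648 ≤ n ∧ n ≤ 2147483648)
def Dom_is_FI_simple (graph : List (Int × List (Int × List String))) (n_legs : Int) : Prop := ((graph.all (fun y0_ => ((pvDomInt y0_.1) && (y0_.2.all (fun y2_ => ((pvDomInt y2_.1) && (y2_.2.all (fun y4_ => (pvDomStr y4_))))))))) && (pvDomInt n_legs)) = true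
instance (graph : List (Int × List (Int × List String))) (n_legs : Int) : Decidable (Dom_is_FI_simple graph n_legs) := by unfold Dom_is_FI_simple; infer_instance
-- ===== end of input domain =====

-- B scans only the boson edges present in the adjacency structure instead of all internal
-- vertex pairs; return value only, no mutation.

-- ===== PORT A =====
def hasConn (graph : List (Int × List (Int × List String))) (v_start v_end : Int)
    (line_type : String) : Bool :=
  match graph.lookup v_start with
  | none => false
  | some nbrs =>
    match nbrs.lookup v_end with
    | none => false
    | some ts => ts.contains line_type

def is_FI_simple (graph : List (Int × List (Int × List String))) (n_legs : Int) : Bool :=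
  let n_verts : Int := graph.length
  if n_legs == 2 && (["b", "f"].all fun t => hasConn graph (n_verts - 2) (n_verts - 1) t) then
    false
  else
    -- for v1, v2 in combinations(range(len(graph) - n_legs), 2): early return False = any
    !((PySem.List.pyRange 0 ((graph.length : Int) - n_legs) 1).any fun v1 =>
      (PySem.List.pyRange (v1 + 1) ((graph.length : Int) - n_legs) 1).any fun v2 =>
        let n_ferm : Int := (if hasConn graph v1 v2 "f" then 1 else 0) +
                            (if hasConn graph v2 v1 "f" then 1 else 0)
        let n_bos : Int := if hasConn graph v1 v2 "b" then 1 else 0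
        decide (1 ≤ n_ferm) && decide (n_bos = 1))

-- ===== PORT B =====
def typesBetween (graph : List (Int × List (Int × List String))) (v w : Int) : List String :=
  match graph.lookup v with
  | none => []
  | some nbrs => (nbrs.lookup w).getD []

def is_FI_simple_alt (graph : List (Int × List (Int × List String))) (n_legs : Int) : Bool :=
  let n_verts : Int := graph.length
  let ext := typesBetween graph (n_verts - 2) (n_verts - 1)
  if n_legs == 2 && ext.contains "b" && ext.contains "f" then
    false
  else
    let n_int : Int := n_verts - n_legs
    !(graph.any fun p =>
      decide (0 ≤ p.1) && decide (p.1 < n_int) &&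
      p.2.any fun q =>
        decide (p.1 < q.1) && decide (q.1 < n_int) && q.2.contains "b" &&
        (q.2.contains "f" || (typesBetween graph q.1 p.1).contains "f"))

-- ===== PRECONDITION & SPEC =====
-- Pre_ excludes association lists with a duplicated key (at either nesting level): such lists
-- do not represent a Python dict, so what a shadowed entry contributes is accidental.
def Pre_is_FI_simple (graph : List (Int × List (Int × List String))) (n_legs : Int) : Prop :=
  graph.Pairwise (fun p q => p.1 ≠ q.1) ∧ ∀ p ∈ graph, p.2.Pairwise (fun a b => a.1 ≠ b.1)
instance (graph : List (Int × List (Int × List String))) (n_legs : Int) : Decidable (Pre_is_FI_simple graph n_legs) := by unfold Pre_is_FI_simple; infer_instance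

def pvWitness_is_FI_simple : (List (Int × List (Int × List String))) × Int :=
  ([(0, [(1, ["f"])]), (1, [])], 0)

def Spec_is_FI_simple (graph : List (Int × List (Int × List String))) (n_legs : Int) (out : Bool) : Prop := out = is_FI_simple_alt graph n_legs
instance (graph : List (Int × List (Int × List String))) (n_legs : Int) (out : Bool) : Decidable (Spec_is_FI_simple graph n_legs out) := by unfold Spec_is_FI_simple; infer_instance

-- ===== CLAIM (what is proved, stated in full; the proofs are below) =====
def Claim_equal_is_FI_simple : Prop := ∀ (graph : List (Int × List (Int × List String))) (n_legs : Int), Dom_is_FI_simple graph n_legs → Pre_is_FI_simple graph n_legs → Spec_is_FI_simple graph n_legs (is_FI_simple graph n_legs)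

-- ===== LEMMAS AND PROOFS =====

-- first-match lookup agrees with membership when keys are distinct
lemma lookup_iff_mem {β : Type} {l : List (Int × β)}
    (h : l.Pairwise (fun p q => p.1 ≠ q.1)) (k : Int) (v : β) :
    l.lookup k = some v ↔ (k, v) ∈ l := by
  induction l with
  | nil => simp
  | cons p t ih =>
    obtain ⟨a, b⟩ := p
    rcases List.pairwise_cons.mp h with ⟨hp, ht⟩
    rw [List.lookup_cons]
    by_cases hk : k = a
    · subst hk
      simp only [BEq.rfl, List.mem_cons, Option.some.injEq]
      constructor
      · rintro rfl; exact Or.inl rfl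
      · rintro (h' | h')
        · cases h'; rfl
        · exact absurd rfl (hp (k, v) h')
    · have hbeq : (k == a) = false := beq_false_of_ne hk
      simp only [hbeq, List.mem_cons]
      rw [ih ht]
      constructor
      · exact Or.inr
      · rintro (h' | h')
        · exact absurd (congrArg Prod.fst h') hk
        · exact h'

-- for an entry actually present (with distinct keys), typesBetween returns exactly its list
lemma typesBetween_of_mem {graph : List (Int × List (Int × List String))}
    (h1 : graph.Pairwise (fun p q => p.1 ≠ q.1))
    (h2 : ∀ p ∈ graph, p.2.Pairwise (fun a b => a.1 ≠ b.1))
    {p : Int × List (Int × List String)} {q : Int × List String}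
    (hp : p ∈ graph) (hq : q ∈ p.2) :
    typesBetween graph p.1 q.1 = q.2 := by
  have hg : graph.lookup p.1 = some p.2 := (lookup_iff_mem h1 p.1 p.2).mpr (by simpa using hp)
  have hn : p.2.lookup q.1 = some q.2 :=
    (lookup_iff_mem (h2 p hp) q.1 q.2).mpr (by simpa using hq)
  simp [typesBetween, hg, hn]

lemma mem_of_lookup {β : Type} {l : List (Int × β)} {k : Int} {v : β}
    (h : l.lookup k = some v) : (k, v) ∈ l := by
  obtain ⟨l₁, l₂, rfl, -⟩ := List.lookup_eq_some_iff.mp h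
  simp

-- a nonempty typesBetween comes from an actual pair of entries
lemma typesBetween_mem_of_contains {graph : List (Int × List (Int × List String))}
    {v w : Int} {t : String} (h : (typesBetween graph v w).contains t = true) :
    ∃ nbrs ts, (v, nbrs) ∈ graph ∧ (w, ts) ∈ nbrs ∧ typesBetween graph v w = ts := by
  unfold typesBetween at h ⊢
  cases hg : graph.lookup v with
  | none => simp [hg] at h
  | some nbrs =>
    cases hn : nbrs.lookup w with
    | none => simp [hg, hn] at h
    | some ts =>
      exact ⟨nbrs, ts, mem_of_lookup hg, mem_of_lookup hn,
        by simp [hn]⟩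

lemma hasConn_eq_typesBetween (g : List (Int × List (Int × List String))) (a b : Int)
    (t : String) : hasConn g a b t = ((typesBetween g a b).contains t) := by
  unfold hasConn typesBetween
  cases g.lookup a with
  | none => simp
  | some nbrs => cases hn : nbrs.lookup b <;> simp [hn]

lemma bool_sum_ge (a b : Bool) :
    decide (1 ≤ (if a then (1 : Int) else 0) + (if b then 1 else 0)) = (a || b) := by
  cases a <;> cases b <;> decide

lemma bool_if_eq_one (a : Bool) : decide ((if a then (1 : Int) else 0) = 1) = a := by
  cases a <;> decide

-- the two scans detect the same pairs when all keys are distinct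
lemma inner_eq (graph : List (Int × List (Int × List String))) (n_legs : Int)
    (hpre : Pre_is_FI_simple graph n_legs) :
    ((PySem.List.pyRange 0 ((graph.length : Int) - n_legs) 1).any fun v1 =>
      (PySem.List.pyRange (v1 + 1) ((graph.length : Int) - n_legs) 1).any fun v2 =>
        ((typesBetween graph v1 v2).contains "f" || (typesBetween graph v2 v1).contains "f") &&
          (typesBetween graph v1 v2).contains "b")
    = (graph.any fun p =>
      decide (0 ≤ p.1) && decide (p.1 < (graph.length : Int) - n_legs) &&
      p.2.any fun q =>
        decide (p.1 < q.1) && decide (q.1 < (graph.length : Int) - n_legs) && q.2.contains "b" &&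
        (q.2.contains "f" || (typesBetween graph q.1 p.1).contains "f")) := by
  obtain ⟨h1, h2⟩ := hpre
  set m : Int := (graph.length : Int) - n_legs with hm
  rw [Bool.eq_iff_iff]
  simp only [List.any_eq_true, PySem.List.mem_pyRange_one, Bool.and_eq_true, Bool.or_eq_true,
    decide_eq_true_eq]
  constructor
  · rintro ⟨v1, ⟨h01, h1m⟩, v2, ⟨h12, h2m⟩, hf, hb⟩
    obtain ⟨nbrs, ts, hpmem, hqmem, htb⟩ := typesBetween_mem_of_contains hb
    refine ⟨(v1, nbrs), hpmem, ⟨h01, h1m⟩, (v2, ts), hqmem, ⟨⟨by omega, h2m⟩, ?_⟩, ?_⟩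
    · rw [← htb]; exact hb
    · rw [← htb]; exact hf
  · rintro ⟨p, hpmem, ⟨h0p, hpm⟩, q, hqmem, ⟨⟨hpq, hqm⟩, hbq⟩, hfq⟩
    have htb : typesBetween graph p.1 q.1 = q.2 := typesBetween_of_mem h1 h2 hpmem hqmem
    exact ⟨p.1, ⟨h0p, hpm⟩, q.1, ⟨by omega, hqm⟩, by rw [htb]; exact hfq, by rw [htb]; exact hbq⟩

-- ===== VERDICT (by name: the statement is the Claim_ definition above) =====
theorem is_FI_simple_spec : Claim_equal_is_FI_simple := by
  intro graph n_legs _hdom hpre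
  unfold Spec_is_FI_simple is_FI_simple is_FI_simple_alt
  simp only [List.all_cons, List.all_nil, Bool.and_true, hasConn_eq_typesBetween,
    bool_sum_ge, bool_if_eq_one, ← Bool.and_assoc, inner_eq graph n_legs hpre]
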